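-- pv_equiv track=rewrite | github.com/TomW1605/AdventOfCode | 2024 - Python/Day 11/Day11.py | blink_pt2
-- ===== SOURCE A (Python) =====
-- def blink_pt2(stones, zeros=0, ones=0, twenty_twenty_fours=0):
--     new_stones = [20, 24] * twenty_twenty_fours
--     twenty_twenty_fours = ones
--     ones = zeros
--     zeros = 0
--     for stone in stones:
--         stone_str = str(stone)
--         if len(stone_str) % 2 == 0:
--             first_half = int(stone_str[0:len(stone_str)//2])
--             second_half = int(stone_str[len(stone_str)//2:])
--
--             if first_half == 0:
--                 zeros += 1
--             elif first_half == 1: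
--                 ones += 1
--             elif first_half == 2024:
--                 twenty_twenty_fours += 1
--             else:
--                 new_stones.append(first_half)
--
--             if second_half == 0:
--                 zeros += 1
--             elif second_half == 1:
--                 ones += 1
--             elif second_half == 2024:
--                 twenty_twenty_fours += 1
--             else:
--                 new_stones.append(second_half)
--         else:
--             new_stones.append(stone * 2024)
--     return new_stones, zeros, ones, twenty_twenty_fours
-- ===== SOURCE B (Python) =====
-- def blink_pt2(stones, zeros=0, ones=0, twenty_twenty_fours=0):
--     # Emit the produced values in one pass (halves tagged True, odd products False),
--     # then get the counters by counting and new_stones by filtering.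
--     emitted = []
--     for stone in stones:
--         s = str(stone)
--         if len(s) % 2 == 0:
--             h = len(s) // 2
--             emitted.append((int(s[:h]), True))
--             emitted.append((int(s[h:]), True))
--         else:
--             emitted.append((stone * 2024, False))
--     halves = [v for v, is_half in emitted if is_half]
--     new_stones = [20, 24] * twenty_twenty_fours + \
--         [v for v, is_half in emitted if not (is_half and v in (0, 1, 2024))]
--     return (new_stones,
--             halves.count(0),
--             zeros + halves.count(1),
--             ones + halves.count(2024))
-- ===== Notes on version B (the rewrite author's own statement) =====
-- stated objective: alternative
-- what changed: Replaces A's single stateful loop with duplicated per-half if/elif counter blocks by one pass that emits tagged produced values, then obtains the three counters with list.count and new_stones with one filter comprehension.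
import Mathlib
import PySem

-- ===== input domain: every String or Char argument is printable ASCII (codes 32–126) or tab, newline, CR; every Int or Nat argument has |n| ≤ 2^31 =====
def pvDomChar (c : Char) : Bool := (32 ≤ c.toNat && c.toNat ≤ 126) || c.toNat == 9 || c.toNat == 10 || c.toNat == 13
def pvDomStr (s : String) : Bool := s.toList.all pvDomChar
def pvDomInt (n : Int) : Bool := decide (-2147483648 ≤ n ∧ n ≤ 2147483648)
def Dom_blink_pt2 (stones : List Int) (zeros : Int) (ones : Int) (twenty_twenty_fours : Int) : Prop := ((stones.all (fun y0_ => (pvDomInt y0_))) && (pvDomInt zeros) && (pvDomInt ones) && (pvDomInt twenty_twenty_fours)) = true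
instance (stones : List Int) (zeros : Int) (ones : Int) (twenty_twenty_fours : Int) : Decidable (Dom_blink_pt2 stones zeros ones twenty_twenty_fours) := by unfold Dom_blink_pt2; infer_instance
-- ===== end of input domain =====

set_option maxHeartbeats 1000000


-- B replaces A's accumulator loop with one emit pass followed by count/filter comprehensions (objective: alternative decomposition, same cost).

-- ===== PORT A =====
-- str(stone) then string slicing ported exactly via PySem.Int.toChars / PySem.List.slice;
-- len(s) is nonnegative so 'len(s) % 2' and 'len(s) // 2' are the Nat operations.
-- '.getD 0' is reached only where int() raises ValueError (Pre_ excludes those inputs).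
def blinkStepA (st : List Int × Int × Int × Int) (stone : Int) : List Int × Int × Int × Int :=
  let (ns, z, o, t) := st
  let cs := PySem.Int.toChars stone
  if cs.length % 2 == 0 then
    let fh := (PySem.Int.ofChars? (PySem.List.slice cs (some 0) (some ((cs.length / 2 : Nat) : Int)))).getD 0
    let sh := (PySem.Int.ofChars? (PySem.List.slice cs (some ((cs.length / 2 : Nat) : Int)) none)).getD 0
    let (ns, z, o, t) :=
      if fh = 0 then (ns, z + 1, o, t)
      else if fh = 1 then (ns, z, o + 1, t)
      else if fh = 2024 then (ns, z, o, t + 1)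
      else (ns ++ [fh], z, o, t)
    if sh = 0 then (ns, z + 1, o, t)
    else if sh = 1 then (ns, z, o + 1, t)
    else if sh = 2024 then (ns, z, o, t + 1)
    else (ns ++ [sh], z, o, t)
  else
    (ns ++ [stone * 2024], z, o, t)

def blink_pt2 (stones : List Int) (zeros : Int) (ones : Int) (twenty_twenty_fours : Int) : List Int × Int × Int × Int :=
  stones.foldl blinkStepA (PySem.List.pyRepeat [20, 24] twenty_twenty_fours, 0, zeros, ones)

-- ===== PORT B =====
def emitStone (stone : Int) : List (Int × Bool) :=
  let cs := PySem.Int.toChars stone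
  if cs.length % 2 == 0 then
    [((PySem.Int.ofChars? (PySem.List.slice cs (some 0) (some ((cs.length / 2 : Nat) : Int)))).getD 0, true),
     ((PySem.Int.ofChars? (PySem.List.slice cs (some ((cs.length / 2 : Nat) : Int)) none)).getD 0, true)]
  else
    [(stone * 2024, false)]

def blink_pt2_alt (stones : List Int) (zeros : Int) (ones : Int) (twenty_twenty_fours : Int) : List Int × Int × Int × Int :=
  let emitted := stones.foldl (fun acc s => acc ++ emitStone s) []
  let halves := (emitted.filter (fun p => p.2)).map (fun p => p.1)
  let new_stones := PySem.List.pyRepeat [20, 24] twenty_twenty_fours ++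
    (emitted.filter (fun p => !(p.2 && (p.1 == 0 || p.1 == 1 || p.1 == 2024)))).map (fun p => p.1)
  (new_stones,
   (halves.count 0 : Int),
   zeros + (halves.count 1 : Int),
   ones + (halves.count 2024 : Int))

-- ===== PRECONDITION & SPEC =====
-- Pre_ excludes exactly the stones in -9..-1 (str(stone) = "-d", even length, first half "-"),
-- on which both A and B raise ValueError in int().
def Pre_blink_pt2 (stones : List Int) (zeros : Int) (ones : Int) (twenty_twenty_fours : Int) : Prop :=
  ∀ s ∈ stones, ¬(-9 ≤ s ∧ s ≤ -1)
instance (stones : List Int) (zeros : Int) (ones : Int) (twenty_twenty_fours : Int) : Decidable (Pre_blink_pt2 stones zeros ones twenty_twenty_fours) := by unfold Pre_blink_pt2; infer_instance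

def pvWitness_blink_pt2 : List Int × Int × Int × Int := ([99, 3, 0, 2024], 1, 2, 3)

def Spec_blink_pt2 (stones : List Int) (zeros : Int) (ones : Int) (twenty_twenty_fours : Int) (out : List Int × Int × Int × Int) : Prop := out = blink_pt2_alt stones zeros ones twenty_twenty_fours
instance (stones : List Int) (zeros : Int) (ones : Int) (twenty_twenty_fours : Int) (out : List Int × Int × Int × Int) : Decidable (Spec_blink_pt2 stones zeros ones twenty_twenty_fours out) := by unfold Spec_blink_pt2; infer_instance

-- ===== CLAIM (what is proved, stated in full; the proofs are below) =====
def Claim_equal_blink_pt2 : Prop := ∀ (stones : List Int) (zeros : Int) (ones : Int) (twenty_twenty_fours : Int), Dom_blink_pt2 stones zeros ones twenty_twenty_fours → Pre_blink_pt2 stones zeros ones twenty_twenty_fours → Spec_blink_pt2 stones zeros ones twenty_twenty_fours (blink_pt2 stones zeros ones twenty_twenty_fours)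

-- ===== LEMMAS AND PROOFS =====

def pvHalves (l : List (Int × Bool)) : List Int := (l.filter (fun p => p.2)).map (fun p => p.1)
def pvKeep (l : List (Int × Bool)) : List Int :=
  (l.filter (fun p => !(p.2 && (p.1 == 0 || p.1 == 1 || p.1 == 2024)))).map (fun p => p.1)

lemma classify_eq (ns : List Int) (z o t fh sh : Int) :
    (let st :=
      if fh = 0 then (ns, z + 1, o, t)
      else if fh = 1 then (ns, z, o + 1, t)
      else if fh = 2024 then (ns, z, o, t + 1)
      else (ns ++ [fh], z, o, t)
     let (ns, z, o, t) := st
     if sh = 0 then (ns, z + 1, o, t)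
     else if sh = 1 then (ns, z, o + 1, t)
     else if sh = 2024 then (ns, z, o, t + 1)
     else (ns ++ [sh], z, o, t)) =
      (ns ++ pvKeep [(fh, true), (sh, true)],
       z + ((pvHalves [(fh, true), (sh, true)]).count 0 : Int),
       o + ((pvHalves [(fh, true), (sh, true)]).count 1 : Int),
       t + ((pvHalves [(fh, true), (sh, true)]).count 2024 : Int)) := by
  simp only [pvKeep, pvHalves, List.filter_cons, List.filter_nil]
  split_ifs <;> simp_all <;> omega

lemma step_eq (ns : List Int) (z o t s : Int) :
    blinkStepA (ns, z, o, t) s =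
      (ns ++ pvKeep (emitStone s),
       z + ((pvHalves (emitStone s)).count 0 : Int),
       o + ((pvHalves (emitStone s)).count 1 : Int),
       t + ((pvHalves (emitStone s)).count 2024 : Int)) := by
  simp only [blinkStepA, emitStone]
  split
  · exact classify_eq ns z o t _ _
  · simp [pvKeep, pvHalves]

lemma loop_inv (stones : List Int) : ∀ (ns : List Int) (z o t : Int),
    stones.foldl blinkStepA (ns, z, o, t) =
      (ns ++ pvKeep (stones.flatMap emitStone),
       z + ((pvHalves (stones.flatMap emitStone)).count 0 : Int),
       o + ((pvHalves (stones.flatMap emitStone)).count 1 : Int),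
       t + ((pvHalves (stones.flatMap emitStone)).count 2024 : Int)) := by
  induction stones with
  | nil => intro ns z o t; simp [pvKeep, pvHalves]
  | cons s rest ih =>
    intro ns z o t
    rw [List.foldl_cons, step_eq, ih]
    simp only [List.flatMap_cons, pvKeep, pvHalves, List.filter_append, List.map_append,
      List.count_append]
    refine Prod.ext (by simp [List.append_assoc]) (Prod.ext (by push_cast; ring) (Prod.ext (by push_cast; ring) (by push_cast; ring)))

-- ===== VERDICT (by name: the statement is the Claim_ definition above) =====
theorem blink_pt2_spec : Claim_equal_blink_pt2 := by
  intro stones zeros ones ttf _ _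
  unfold Spec_blink_pt2 blink_pt2 blink_pt2_alt
  rw [loop_inv, PySem.List.foldl_append_eq_flatMap]
  simp [pvKeep, pvHalves]
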